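-- pv_equiv track=rewrite | github.com/kctsai03/decifer_analysis | src/get_clone_trees.py | get_clone_trees
-- ===== SOURCE A (Python) =====
-- def get_clone_trees(vertices):
--   output = []
--   for i in vertices:
--     for j in vertices:
--       prufer_sequence = [i, j]
--       edges = get_prufer_edges(prufer_sequence, len(vertices))
--       output.append(edges)
--   return output
--
-- def get_prufer_edges(prufer_sequence, num_vertices):
--
--   # create the list array (all the values of the vertices)
--   all_nodes = list(range(num_vertices))
--
--   edge_list = []
--
--   # we need to find the smallest element in the list that isn't in the sequence
--   for index in range(2):
--     for node in all_nodes: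
--       if node not in prufer_sequence:
--         edge_list.append([prufer_sequence[index], node])
--         prufer_sequence[index] = -1
--         all_nodes.remove(node)
--         break
--   edge_list.append([all_nodes[0], all_nodes[1]])
--   return edge_list
-- ===== SOURCE B (Python) =====
-- def get_clone_trees(vertices):
--     out = []
--     for i in vertices:
--         for j in vertices:
--             a = next(k for k in range(3) if k != i and k != j)
--             b = next(k for k in range(4) if k != a and k != j)
--             r0, r1 = [k for k in range(4) if k != a and k != b]
--             out.append([[i, a], [j, b], [r0, r1]])
--     return out
-- ===== Notes on version B (the rewrite author's own statement) =====
-- stated objective: faster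
-- what changed: Per ordered pair (i,j), B replaces A's rebuild-scan-and-remove over list(range(n)) (each pair costs O(n)) with O(1) closed-form picks: the smallest free node is always in {0,1,2}, the second in {0,1,2,3}, and the final edge is the two smallest of {0,1,2,3} minus those picks.
import Mathlib
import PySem

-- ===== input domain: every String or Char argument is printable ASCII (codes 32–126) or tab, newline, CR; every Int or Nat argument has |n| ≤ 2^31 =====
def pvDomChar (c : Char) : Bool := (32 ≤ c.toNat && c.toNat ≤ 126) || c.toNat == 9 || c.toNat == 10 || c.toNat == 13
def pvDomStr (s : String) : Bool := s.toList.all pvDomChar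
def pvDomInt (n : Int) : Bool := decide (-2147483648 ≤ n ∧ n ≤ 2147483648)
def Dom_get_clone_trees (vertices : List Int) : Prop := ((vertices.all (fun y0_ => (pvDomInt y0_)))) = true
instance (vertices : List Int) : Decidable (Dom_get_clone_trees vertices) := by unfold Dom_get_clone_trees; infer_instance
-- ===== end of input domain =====

-- B re-implements A's O(n) scan-and-remove per pair by O(1) closed-form smallest-free-node
-- picks (objective: faster, O(n^3) -> O(n^2)); equivalence proved on Pre_ (A raises IndexError
-- when 1 <= len(vertices) <= 3).

-- ===== PORT A =====
-- inner `for node in all_nodes: if node not in prufer_sequence: … break` combined with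
-- `all_nodes.remove(node)`: returns the found node and the node list with it removed.
def pvGpeScan (seq : List Int) : List Int → Option (Int × List Int)
  | [] => none
  | n :: ns =>
    if n ∈ seq then (pvGpeScan seq ns).map (fun p => (p.1, n :: p.2))
    else some (n, ns)

-- one iteration of `for index in range(2)` (state: prufer_sequence, all_nodes, edge_list)
def pvGpeStep (st : List Int × List Int × List (List Int)) (index : Nat) :
    List Int × List Int × List (List Int) :=
  let (seq, nodes, edges) := st
  match pvGpeScan seq nodes with
  | some (node, rest) => (seq.set index (-1), rest, edges ++ [[seq.getD index 0, node]])
  | none => st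

def get_prufer_edges (seq : List Int) (num : Int) : List (List Int) :=
  let st := [0, 1].foldl pvGpeStep (seq, PySem.List.pyRange 0 num 1, [])
  -- all_nodes[0], all_nodes[1] raise IndexError when out of range (excluded by Pre_)
  st.2.2 ++ [[st.2.1.getD 0 0, st.2.1.getD 1 0]]

def get_clone_trees (vertices : List Int) : List (List (List Int)) :=
  vertices.foldl (fun output i =>
    vertices.foldl (fun output j =>
      output ++ [get_prufer_edges [i, j] (vertices.length : Int)]) output) []

-- ===== PORT B =====
-- next(k for k in range(3) if k != i and k != j)  etc.
def pvFirstFree (cands : List Int) (x y : Int) : Int :=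
  (cands.find? (fun k => decide (k ≠ x) && decide (k ≠ y))).getD 0

def get_clone_trees_alt (vertices : List Int) : List (List (List Int)) :=
  vertices.foldl (fun out i =>
    vertices.foldl (fun out j =>
      let a := pvFirstFree [0, 1, 2] i j
      let b := pvFirstFree [0, 1, 2, 3] a j
      let rest := ([0, 1, 2, 3] : List Int).filter (fun k => decide (k ≠ a) && decide (k ≠ b))
      out ++ [[[i, a], [j, b], [rest.getD 0 0, rest.getD 1 0]]]) out) []

-- ===== PRECONDITION & SPEC =====
-- Pre_ excludes 1 ≤ len(vertices) ≤ 3, on which A raises IndexError (all_nodes[1] after removals).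
def Pre_get_clone_trees (vertices : List Int) : Prop :=
  vertices = [] ∨ 4 ≤ vertices.length
instance (vertices : List Int) : Decidable (Pre_get_clone_trees vertices) := by
  unfold Pre_get_clone_trees; infer_instance

def pvWitness_get_clone_trees : List Int := [3, 1, 4, 1, 5]

def Spec_get_clone_trees (vertices : List Int) (out : List (List (List Int))) : Prop := out = get_clone_trees_alt vertices
instance (vertices : List Int) (out : List (List (List Int))) : Decidable (Spec_get_clone_trees vertices out) := by unfold Spec_get_clone_trees; infer_instance

-- ===== CLAIM (what is proved, stated in full; the proofs are below) =====
def Claim_equal_get_clone_trees : Prop := ∀ (vertices : List Int), Dom_get_clone_trees vertices → Pre_get_clone_trees vertices → Spec_get_clone_trees vertices (get_clone_trees vertices)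

-- ===== LEMMAS AND PROOFS =====

-- per-pair equality: for 4 ≤ n, A's get_prufer_edges equals B's closed-form triple
set_option maxHeartbeats 4000000 in
set_option maxRecDepth 4000 in
theorem pv_pair_eq (n : Int) (hn : 4 ≤ n) (i j : Int) :
    get_prufer_edges [i, j] n =
      (let a := pvFirstFree [0, 1, 2] i j
       let b := pvFirstFree [0, 1, 2, 3] a j
       let rest := ([0, 1, 2, 3] : List Int).filter (fun k => decide (k ≠ a) && decide (k ≠ b))
       [[i, a], [j, b], [rest.getD 0 0, rest.getD 1 0]]) := by
  have h4 : PySem.List.pyRange 0 n 1 = 0 :: 1 :: 2 :: 3 :: PySem.List.pyRange 4 n 1 := by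
    rw [PySem.List.pyRange_one_cons (by omega), PySem.List.pyRange_one_cons (by omega),
        PySem.List.pyRange_one_cons (by omega), PySem.List.pyRange_one_cons (by omega)]
    norm_num
  unfold get_prufer_edges
  rw [h4]
  by_cases h0i : i = 0 <;> by_cases h0j : j = 0 <;> by_cases h1i : i = 1 <;>
    by_cases h1j : j = 1 <;> by_cases h2i : i = 2 <;> by_cases h2j : j = 2 <;>
    by_cases h3j : j = 3 <;>
    simp_all [pvGpeStep, pvGpeScan, pvFirstFree, List.find?, List.filter, eq_comm]

-- ===== VERDICT (by name: the statement is the Claim_ definition above) =====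
theorem get_clone_trees_spec : Claim_equal_get_clone_trees := by
  intro vs _ hpre
  unfold Spec_get_clone_trees
  rcases hpre with h | h
  · subst h; rfl
  · unfold get_clone_trees get_clone_trees_alt
    have hfun :
        (fun (output : List (List (List Int))) (i : Int) =>
          vs.foldl (fun output j => output ++ [get_prufer_edges [i, j] (vs.length : Int)]) output)
        =
        (fun (out : List (List (List Int))) (i : Int) =>
          vs.foldl (fun out j =>
            let a := pvFirstFree [0, 1, 2] i j
            let b := pvFirstFree [0, 1, 2, 3] a j
            let rest := ([0, 1, 2, 3] : List Int).filter (fun k => decide (k ≠ a) && decide (k ≠ b))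
            out ++ [[[i, a], [j, b], [rest.getD 0 0, rest.getD 1 0]]]) out) := by
      funext out i
      congr 1
      funext out j
      rw [pv_pair_eq (vs.length : Int) (by exact_mod_cast h) i j]
    rw [hfun]
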